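-- pv_equiv track=rewrite | github.com/pmtutko/AdventOfCode | AdventOfCode/2025/Day 5/solution.py | part_1
-- ===== SOURCE A (Python) =====
-- def part_1(id_ranges, ingredient_ids) -> int:
--     """ AoC Part 1 Solution: test answer = 3, answer = 782  """
--     fresh_ingredients = 0
--     for ingredient_id in ingredient_ids:
--         for id_range in id_ranges:
--             if ingredient_id >= id_range[0] and ingredient_id <= id_range[1]:
--                 fresh_ingredients += 1
--                 break
--     return fresh_ingredients
-- ===== SOURCE B (Python) =====
-- def part_1(id_ranges, ingredient_ids) -> int:
--     """Merge the id ranges into sorted disjoint intervals once, then test each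
--     ingredient against the merged intervals with an early exit."""
--     merged = []
--     for lo, hi in sorted(id_ranges, key=lambda r: r[0]):
--         if hi < lo:
--             continue
--         if merged and lo <= merged[-1][1]:
--             merged[-1] = (merged[-1][0], max(merged[-1][1], hi))
--         else:
--             merged.append((lo, hi))
--     count = 0
--     for x in ingredient_ids:
--         for lo, hi in merged:
--             if x < lo:
--                 break
--             if x <= hi:
--                 count += 1
--                 break
--     return count
-- ===== Notes on version B (the rewrite author's own statement) =====
-- stated objective: faster
-- what changed: Instead of scanning all ranges for every ingredient, B sorts the ranges once and merges them into disjoint intervals, then tests each ingredient against the merged intervals with an early exit once intervals start past it.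
import Mathlib
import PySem

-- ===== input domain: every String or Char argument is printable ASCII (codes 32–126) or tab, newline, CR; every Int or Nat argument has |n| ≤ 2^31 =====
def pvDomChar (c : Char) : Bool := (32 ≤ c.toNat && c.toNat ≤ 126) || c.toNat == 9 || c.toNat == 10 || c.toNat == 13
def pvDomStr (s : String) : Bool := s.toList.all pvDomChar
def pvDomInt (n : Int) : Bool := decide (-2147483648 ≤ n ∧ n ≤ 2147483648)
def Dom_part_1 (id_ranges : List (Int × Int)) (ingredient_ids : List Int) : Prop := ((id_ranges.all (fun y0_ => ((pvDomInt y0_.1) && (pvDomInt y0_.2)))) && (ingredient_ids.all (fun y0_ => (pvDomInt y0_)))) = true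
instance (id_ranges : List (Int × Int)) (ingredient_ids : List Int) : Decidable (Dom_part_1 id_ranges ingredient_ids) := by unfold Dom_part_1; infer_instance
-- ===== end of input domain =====

-- B merges the ranges into sorted disjoint intervals once and tests each ingredient
-- against them with an early exit (objective: faster preprocessing-based algorithm).

-- ===== PORT A =====
-- inner 'for id_range in id_ranges: … break' loop: returns the contribution (1 on first hit, else 0)
def pyFreshA (x : Int) : List (Int × Int) → Int
  | [] => 0
  | r :: rs => if x ≥ r.1 ∧ x ≤ r.2 then 1 else pyFreshA x rs

def part_1 (id_ranges : List (Int × Int)) (ingredient_ids : List Int) : Int :=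
  ingredient_ids.foldl (fun acc x => acc + pyFreshA x id_ranges) 0

-- ===== PORT B =====
-- one step of B's merge loop; the accumulator holds the merged list REVERSED
-- (head = Python's merged[-1]); part_1_alt reverses it at the end.
def mergeStepB (acc : List (Int × Int)) (r : Int × Int) : List (Int × Int) :=
  if r.2 < r.1 then acc
  else match acc with
    | [] => [r]
    | (llo, lhi) :: rest =>
        if r.1 ≤ lhi then (llo, max lhi r.2) :: rest else r :: (llo, lhi) :: rest

-- inner 'for lo, hi in merged: … break' loop of B
def lookupB (x : Int) : List (Int × Int) → Bool
  | [] => false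
  | (lo, hi) :: rest => if x < lo then false else if x ≤ hi then true else lookupB x rest

def part_1_alt (id_ranges : List (Int × Int)) (ingredient_ids : List Int) : Int :=
  let merged := ((PySem.List.sorted id_ranges (fun r => r.1) false).foldl mergeStepB []).reverse
  ingredient_ids.foldl (fun acc x => if lookupB x merged then acc + 1 else acc) 0

-- ===== PRECONDITION & SPEC =====
def Spec_part_1 (id_ranges : List (Int × Int)) (ingredient_ids : List Int) (out : Int) : Prop := out = part_1_alt id_ranges ingredient_ids
instance (id_ranges : List (Int × Int)) (ingredient_ids : List Int) (out : Int) : Decidable (Spec_part_1 id_ranges ingredient_ids out) := by unfold Spec_part_1; infer_instance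

-- ===== CLAIM (what is proved, stated in full; the proofs are below) =====
def Claim_equal_part_1 : Prop := ∀ (id_ranges : List (Int × Int)) (ingredient_ids : List Int), Dom_part_1 id_ranges ingredient_ids → Spec_part_1 id_ranges ingredient_ids (part_1 id_ranges ingredient_ids)

-- ===== LEMMAS AND PROOFS =====

-- "x lies in some interval of l"
abbrev InAny (x : Int) (l : List (Int × Int)) : Prop := ∃ r ∈ l, r.1 ≤ x ∧ x ≤ r.2

lemma pyFreshA_cons (x : Int) (r : Int × Int) (rs : List (Int × Int)) :
    pyFreshA x (r :: rs) = if x ≥ r.1 ∧ x ≤ r.2 then 1 else pyFreshA x rs := rfl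

lemma pyFreshA_eq (x : Int) (l : List (Int × Int)) :
    pyFreshA x l = if InAny x l then 1 else 0 := by
  induction l with
  | nil => simp [pyFreshA]
  | cons r rs ih =>
      rw [pyFreshA_cons]
      by_cases h : x ≥ r.1 ∧ x ≤ r.2
      · rw [if_pos h, if_pos ⟨r, List.mem_cons_self, h.1, h.2⟩]
      · rw [if_neg h, ih]
        by_cases h2 : InAny x rs
        · obtain ⟨p, hp, h1, h2'⟩ := h2
          rw [if_pos ⟨p, hp, h1, h2'⟩, if_pos ⟨p, List.mem_cons_of_mem _ hp, h1, h2'⟩]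
        · rw [if_neg h2, if_neg ?_]
          rintro ⟨p, hp, h1, h2'⟩
          rcases List.mem_cons.1 hp with hp | hp
          · subst hp; exact h ⟨h1, h2'⟩
          · exact h2 ⟨p, hp, h1, h2'⟩

-- invariant of B's merge accumulator (stored reversed: head is the last interval)
def MInv (acc : List (Int × Int)) : Prop :=
  acc.IsChain (fun a b => b.2 < a.1) ∧ ∀ i ∈ acc, i.1 ≤ i.2

lemma mergeStepB_empty (acc : List (Int × Int)) (r : Int × Int) (h : r.2 < r.1) :
    mergeStepB acc r = acc := by simp [mergeStepB, h]

lemma mergeStepB_nil (r : Int × Int) (h : ¬ r.2 < r.1) :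
    mergeStepB [] r = [r] := by simp [mergeStepB, h]

lemma mergeStepB_merge (llo lhi : Int) (rest : List (Int × Int)) (r : Int × Int)
    (h : ¬ r.2 < r.1) (hm : r.1 ≤ lhi) :
    mergeStepB ((llo, lhi) :: rest) r = (llo, max lhi r.2) :: rest := by
  simp [mergeStepB, h, hm]

lemma mergeStepB_new (llo lhi : Int) (rest : List (Int × Int)) (r : Int × Int)
    (h : ¬ r.2 < r.1) (hm : ¬ r.1 ≤ lhi) :
    mergeStepB ((llo, lhi) :: rest) r = r :: (llo, lhi) :: rest := by
  simp [mergeStepB, h, hm]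

lemma merge_loop (l : List (Int × Int)) :
    ∀ acc, l.Pairwise (fun a b => a.1 ≤ b.1) → MInv acc →
      (∀ i ∈ acc, ∀ r ∈ l, i.1 ≤ r.1) →
      MInv (l.foldl mergeStepB acc) ∧
      (∀ x, InAny x (l.foldl mergeStepB acc) ↔ InAny x acc ∨ InAny x l) := by
  induction l with
  | nil => intro acc _ hinv _; exact ⟨hinv, fun x => by simp [InAny]⟩
  | cons r rs ih =>
      intro acc hpw hinv hle
      have hpw_tail : rs.Pairwise (fun a b => a.1 ≤ b.1) := (List.pairwise_cons.1 hpw).2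
      have hr_le : ∀ q ∈ rs, r.1 ≤ q.1 := (List.pairwise_cons.1 hpw).1
      have step : MInv (mergeStepB acc r) ∧
          (∀ i ∈ mergeStepB acc r, ∀ q ∈ rs, i.1 ≤ q.1) ∧
          (∀ x, InAny x (mergeStepB acc r) ↔ InAny x acc ∨ (r.1 ≤ x ∧ x ≤ r.2)) := by
        by_cases hemp : r.2 < r.1
        · rw [mergeStepB_empty acc r hemp]
          refine ⟨hinv, ?_, ?_⟩
          · intro i hi q hq; exact hle i hi q (List.mem_cons_of_mem _ hq)
          · intro x
            constructor
            · exact Or.inl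
            · rintro (h | ⟨h1, h2⟩)
              · exact h
              · omega
        · match acc with
          | [] =>
              rw [mergeStepB_nil r hemp]
              refine ⟨⟨List.isChain_singleton _, ?_⟩, ?_, ?_⟩
              · intro i hi
                rw [List.mem_singleton] at hi; subst hi; omega
              · intro i hi q hq
                rw [List.mem_singleton] at hi; subst hi; exact hr_le q hq
              · intro x; simp [InAny]
          | (llo, lhi) :: rest =>
              have hll : llo ≤ lhi := hinv.2 (llo, lhi) List.mem_cons_self
              have hlor : llo ≤ r.1 := hle (llo, lhi) List.mem_cons_self r List.mem_cons_self
              by_cases hm : r.1 ≤ lhi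
              · -- merge into the last interval
                rw [mergeStepB_merge llo lhi rest r hemp hm]
                refine ⟨⟨?_, ?_⟩, ?_, ?_⟩
                · rcases rest with _ | ⟨b, rest'⟩
                  · exact List.isChain_singleton _
                  · have hc := List.isChain_cons_cons.1 hinv.1
                    exact List.isChain_cons_cons.2 ⟨hc.1, hc.2⟩
                · intro i hi
                  rcases List.mem_cons.1 hi with hi | hi
                  · subst hi; simp; omega
                  · exact hinv.2 i (List.mem_cons_of_mem _ hi)
                · intro i hi q hq
                  rcases List.mem_cons.1 hi with hi | hi
                  · subst hi
                    simpa using le_trans hlor (hr_le q hq)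
                  · exact le_trans (hle i (List.mem_cons_of_mem _ hi) r List.mem_cons_self)
                      (hr_le q hq)
                · intro x
                  constructor
                  · rintro ⟨p, hp, h1, h2⟩
                    rcases List.mem_cons.1 hp with hp | hp
                    · subst hp
                      simp only at h1 h2
                      by_cases hx : x ≤ lhi
                      · exact Or.inl ⟨(llo, lhi), List.mem_cons_self, h1, hx⟩
                      · exact Or.inr ⟨by omega, by omega⟩
                    · exact Or.inl ⟨p, List.mem_cons_of_mem _ hp, h1, h2⟩
                  · rintro (⟨p, hp, h1, h2⟩ | ⟨h1, h2⟩)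
                    · rcases List.mem_cons.1 hp with hp | hp
                      · subst hp
                        refine ⟨(llo, max lhi r.2), List.mem_cons_self, ?_⟩
                        simp only at h1 h2 ⊢
                        omega
                      · exact ⟨p, List.mem_cons_of_mem _ hp, h1, h2⟩
                    · refine ⟨(llo, max lhi r.2), List.mem_cons_self, ?_⟩
                      simp only
                      omega
              · -- start a new interval
                rw [mergeStepB_new llo lhi rest r hemp hm]
                refine ⟨⟨?_, ?_⟩, ?_, ?_⟩
                · exact List.isChain_cons_cons.2 ⟨by simp; omega, hinv.1⟩
                · intro i hi
                  rcases List.mem_cons.1 hi with hi | hi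
                  · subst hi; omega
                  · exact hinv.2 i hi
                · intro i hi q hq
                  rcases List.mem_cons.1 hi with hi | hi
                  · subst hi; exact hr_le q hq
                  · exact le_trans (hle i hi r List.mem_cons_self) (hr_le q hq)
                · intro x
                  constructor
                  · rintro ⟨p, hp, h1, h2⟩
                    rcases List.mem_cons.1 hp with hp | hp
                    · subst hp; exact Or.inr ⟨h1, h2⟩
                    · exact Or.inl ⟨p, hp, h1, h2⟩
                  · rintro (⟨p, hp, h1, h2⟩ | ⟨h1, h2⟩)
                    · exact ⟨p, List.mem_cons_of_mem _ hp, h1, h2⟩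
                    · exact ⟨r, List.mem_cons_self, h1, h2⟩
      obtain ⟨sinv, sle, sun⟩ := step
      obtain ⟨finv, fun_⟩ := ih (mergeStepB acc r) hpw_tail sinv sle
      refine ⟨finv, fun x => ?_⟩
      rw [List.foldl_cons, fun_ x, sun x]
      constructor
      · rintro ((h | h) | h)
        · exact Or.inl h
        · exact Or.inr ⟨r, List.mem_cons_self, h⟩
        · rcases h with ⟨p, hp, h1, h2⟩
          exact Or.inr ⟨p, List.mem_cons_of_mem _ hp, h1, h2⟩
      · rintro (h | ⟨p, hp, h1, h2⟩)
        · exact Or.inl (Or.inl h)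
        · rcases List.mem_cons.1 hp with hp | hp
          · subst hp; exact Or.inl (Or.inr ⟨h1, h2⟩)
          · exact Or.inr ⟨p, hp, h1, h2⟩

-- in a gap-sorted list, everything after the head starts above the head's end
lemma chain_lo (m : List (Int × Int)) (hc : m.IsChain (fun a b => a.2 < b.1))
    (hne : ∀ i ∈ m, i.1 ≤ i.2) :
    ∀ p t, m = p :: t → ∀ i ∈ t, p.2 < i.1 := by
  induction m with
  | nil => intro p t h; simp at h
  | cons a s ih =>
      intro p t h i hi
      injection h with hph hth
      subst hph; subst hth
      rcases s with _ | ⟨b, s'⟩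
      · simp at hi
      · have h1 : a.2 < b.1 := (List.isChain_cons_cons.1 hc).1
        rcases List.mem_cons.1 hi with hi | hi
        · subst hi; exact h1
        · have hb : b.2 < i.1 := ih (List.isChain_cons_cons.1 hc).2
            (fun j hj => hne j (List.mem_cons_of_mem _ hj)) b s' rfl i hi
          have hbb : b.1 ≤ b.2 := hne b (by simp)
          omega

lemma lookupB_cons (x lo hi : Int) (rest : List (Int × Int)) :
    lookupB x ((lo, hi) :: rest)
      = if x < lo then false else if x ≤ hi then true else lookupB x rest := rfl

lemma lookupB_eq (x : Int) (m : List (Int × Int))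
    (hc : m.IsChain (fun a b => a.2 < b.1)) (hne : ∀ i ∈ m, i.1 ≤ i.2) :
    lookupB x m = true ↔ InAny x m := by
  induction m with
  | nil => simp [lookupB, InAny]
  | cons p t ih =>
      have hpt : ∀ i ∈ t, p.2 < i.1 := chain_lo (p :: t) hc hne p t rfl
      have hp : p.1 ≤ p.2 := hne p List.mem_cons_self
      obtain ⟨lo, hi⟩ := p
      rw [lookupB_cons]
      by_cases h1 : x < lo
      · rw [if_pos h1]
        simp only [Bool.false_eq_true, false_iff]
        rintro ⟨q, hq, hq1, hq2⟩
        rcases List.mem_cons.1 hq with hq | hq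
        · subst hq; simp only at hq1 hq2; omega
        · have := hpt q hq; simp only at this hq1 hq2; omega
      · rw [if_neg h1]
        by_cases h2 : x ≤ hi
        · rw [if_pos h2]
          simp only [true_iff]
          exact ⟨(lo, hi), List.mem_cons_self, by simp; omega⟩
        · rw [if_neg h2]
          rw [ih hc.tail (fun i hiM => hne i (List.mem_cons_of_mem _ hiM))]
          constructor
          · rintro ⟨q, hq, hq1, hq2⟩; exact ⟨q, List.mem_cons_of_mem _ hq, hq1, hq2⟩
          · rintro ⟨q, hq, hq1, hq2⟩
            rcases List.mem_cons.1 hq with hq | hq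
            · subst hq; simp only at hq1 hq2; omega
            · exact ⟨q, hq, hq1, hq2⟩

lemma fold_eq (R : List (Int × Int)) (f : Int → Bool)
    (hpt : ∀ x, pyFreshA x R = if f x then 1 else 0) :
    ∀ (xs : List Int) (a : Int),
      xs.foldl (fun acc x => acc + pyFreshA x R) a
        = xs.foldl (fun acc x => if f x then acc + 1 else acc) a := by
  intro xs
  induction xs with
  | nil => intro a; rfl
  | cons x t ih =>
      intro a
      simp only [List.foldl_cons, hpt x]
      by_cases h : f x
      · simp [h, ih]
      · simp [h, ih]

-- ===== VERDICT (by name: the statement is the Claim_ definition above) =====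
theorem part_1_spec : Claim_equal_part_1 := by
  intro id_ranges ingredient_ids _
  unfold Spec_part_1 part_1 part_1_alt
  set srt := PySem.List.sorted id_ranges (fun r => r.1) false with hs
  have hpw : srt.Pairwise (fun a b => a.1 ≤ b.1) := PySem.List.sorted_pairwise _ _
  obtain ⟨finv, fiff⟩ := merge_loop srt [] hpw ⟨by simp, by simp⟩ (by simp)
  set res := srt.foldl mergeStepB [] with hres
  have hcrev : res.reverse.IsChain (fun a b => a.2 < b.1) := by
    rw [List.isChain_reverse]
    exact finv.1
  have hnerev : ∀ i ∈ res.reverse, i.1 ≤ i.2 := by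
    intro i hi; exact finv.2 i (List.mem_reverse.1 hi)
  have key : ∀ x, pyFreshA x id_ranges = if lookupB x res.reverse then 1 else 0 := by
    intro x
    rw [pyFreshA_eq]
    have h1 : InAny x id_ranges ↔ InAny x srt := by
      constructor
      · rintro ⟨p, hp, h⟩; exact ⟨p, (PySem.List.mem_sorted _ _ _ _).2 hp, h⟩
      · rintro ⟨p, hp, h⟩; exact ⟨p, (PySem.List.mem_sorted _ _ _ _).1 hp, h⟩
    have h2 : InAny x srt ↔ InAny x res.reverse := by
      have hrev : InAny x res.reverse ↔ InAny x res := by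
        constructor
        · rintro ⟨p, hp, h⟩; exact ⟨p, List.mem_reverse.1 hp, h⟩
        · rintro ⟨p, hp, h⟩; exact ⟨p, List.mem_reverse.2 hp, h⟩
      rw [hrev, fiff x]
      simp [InAny]
    rw [← lookupB_eq x res.reverse hcrev hnerev] at h2
    by_cases h : lookupB x res.reverse
    · rw [if_pos h, if_pos (h1.2 (h2.2 h))]
    · rw [if_neg h, if_neg (fun hx => h (h2.1 (h1.1 hx)))]
  exact fold_eq id_ranges (fun x => lookupB x res.reverse) key ingredient_ids 0
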